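-- pv_equiv track=rewrite | github.com/oci1517/tp | source/02/solution/lib.py | max_word_len
-- ===== SOURCE A (Python) =====
-- def max_word_len(sentence):
--     index = 0
--     max_size = 0
--     current_size = 0
--
--     separators = ' ,;.:?!"\''
--     sentence += ' '
--
--     for i, char in enumerate(sentence):
--         if char in separators or i == len(sentence) - 1:
--             if current_size > max_size:
--                 max_size = current_size
--                 index = i - current_size
--             current_size = 0
--         else:
--             current_size += 1
--
--     return (index, max_size)
-- ===== SOURCE B (Python) =====
-- def max_word_len(sentence):
--     seps = ' ,;.:?!"\''
--     best_start, best_len = 0, 0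
--     i, n = 0, len(sentence)
--     while i < n:
--         if sentence[i] in seps:
--             i += 1
--         else:
--             j = i
--             while j < n and sentence[j] not in seps:
--                 j += 1
--             if j - i > best_len:
--                 best_start, best_len = i, j - i
--             i = j
--     return (best_start, best_len)
-- ===== Notes on version B (the rewrite author's own statement) =====
-- stated objective: alternative
-- what changed: B tokenizes the sentence into maximal non-separator runs (skip a separator / scan a whole word at once) and reduces them with a strictly-greater comparison, instead of A's char-by-char max/current accumulator state machine with an appended trailing separator.
import Mathlib
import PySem

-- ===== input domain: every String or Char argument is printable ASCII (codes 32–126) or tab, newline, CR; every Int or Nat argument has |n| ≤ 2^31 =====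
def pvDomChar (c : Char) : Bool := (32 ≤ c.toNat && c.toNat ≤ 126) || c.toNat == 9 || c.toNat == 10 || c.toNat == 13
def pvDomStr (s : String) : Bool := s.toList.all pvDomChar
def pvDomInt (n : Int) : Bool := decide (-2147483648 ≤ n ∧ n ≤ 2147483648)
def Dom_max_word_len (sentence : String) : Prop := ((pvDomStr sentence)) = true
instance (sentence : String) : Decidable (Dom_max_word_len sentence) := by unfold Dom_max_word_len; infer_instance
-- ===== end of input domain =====

-- B replaces A's char-by-char max/current accumulator state machine by a tokenizer that
-- enumerates maximal non-separator runs and keeps the first longest one (objective: alternative).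

-- shared separator class ' ,;.:?!"\'' (the literal constant of both sources)
def pvIsSep (c : Char) : Bool :=
  c = ' ' || c = ',' || c = ';' || c = '.' || c = ':' || c = '?' || c = '!' || c = '"' || c = '\''

-- ===== PORT A =====
-- loop over the enumerated characters of the sentence with a trailing space appended; state (index, max_size, current_size)
def pvALoop : List Char → Nat → Nat → Int → Int → Int → Int × Int × Int
  | [], _, _, index, mx, cur => (index, mx, cur)
  | c :: cs, i, n, index, mx, cur =>
    if pvIsSep c ∨ i = n - 1 then
      if cur > mx then pvALoop cs (i + 1) n ((i : Int) - cur) cur 0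
      else pvALoop cs (i + 1) n index mx 0
    else pvALoop cs (i + 1) n index mx (cur + 1)

def max_word_len (sentence : String) : Int × Int :=
  let s := sentence.toList ++ [' ']
  let r := pvALoop s 0 s.length 0 0 0
  (r.1, r.2.1)

-- ===== PORT B =====
-- tokenizer: skip a separator, or emit the maximal non-separator run (start, length) and continue
-- after it (Source B's inner `while j < n and sentence[j] not in seps` run scan ported as takeWhile/dropWhile)
def pvBTokens : List Char → Nat → List (Int × Int)
  | [], _ => []
  | c :: cs, i =>
    if h : pvIsSep c then pvBTokens cs (i + 1)
    else
      let w := (c :: cs).takeWhile (fun x => !pvIsSep x)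
      ((i : Int), (w.length : Int)) ::
        pvBTokens ((c :: cs).dropWhile (fun x => !pvIsSep x)) (i + w.length)
  termination_by l _ => l.length
  decreasing_by
    · simp
    · simp only [List.dropWhile_cons, h, Bool.not_false]
      exact Nat.lt_succ_of_le (List.length_dropWhile_le _ _)

def max_word_len_alt (sentence : String) : Int × Int :=
  (pvBTokens sentence.toList 0).foldl (fun best t => if t.2 > best.2 then t else best) (0, 0)

-- ===== PRECONDITION & SPEC =====
def Spec_max_word_len (sentence : String) (out : Int × Int) : Prop := out = max_word_len_alt sentence
instance (sentence : String) (out : Int × Int) : Decidable (Spec_max_word_len sentence out) := by unfold Spec_max_word_len; infer_instance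

-- ===== CLAIM (what is proved, stated in full; the proofs are below) =====
def Claim_equal_max_word_len : Prop := ∀ (sentence : String), Dom_max_word_len sentence → Spec_max_word_len sentence (max_word_len sentence)

-- ===== LEMMAS AND PROOFS =====

-- first two components of A's loop state (the returned pair)
def pvProj (r : Int × Int × Int) : Int × Int := (r.1, r.2.1)

-- B's reduce step
def pvBStep (b t : Int × Int) : Int × Int := if t.2 > b.2 then t else b

-- token stream of l as seen by A's loop with a pending run of length cur ending just before position i
def pvTwp (l : List Char) (i : Nat) (cur : Int) : List (Int × Int) :=
  let w := l.takeWhile (fun x => !pvIsSep x)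
  let rest := pvBTokens (l.dropWhile (fun x => !pvIsSep x)) (i + w.length)
  if cur + w.length > 0 then ((i : Int) - cur, cur + w.length) :: rest else rest

theorem pvTwp_nil (i : Nat) (cur : Int) :
    pvTwp [] i cur = if cur > 0 then [((i : Int) - cur, cur)] else [] := by
  simp [pvTwp, pvBTokens]

theorem pvTwp_cons_sep (c : Char) (cs : List Char) (i : Nat) (cur : Int) (h : pvIsSep c = true) :
    pvTwp (c :: cs) i cur
      = (if cur > 0 then [((i : Int) - cur, cur)] else []) ++ pvBTokens cs (i + 1) := by
  have hrest : pvBTokens (c :: cs) i = pvBTokens cs (i + 1) := by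
    rw [pvBTokens]; simp [h]
  simp only [pvTwp, List.takeWhile_cons, List.dropWhile_cons, h]
  simp [hrest]
  split_ifs <;> simp

theorem pvTwp_cons_nonsep (c : Char) (cs : List Char) (i : Nat) (cur : Int)
    (h : pvIsSep c = false) :
    pvTwp (c :: cs) i cur = pvTwp cs (i + 1) (cur + 1) := by
  simp only [pvTwp, List.takeWhile_cons, List.dropWhile_cons, h]
  simp only [Bool.not_false, if_true, List.length_cons]
  have e1 : i + ((cs.takeWhile (fun x => !pvIsSep x)).length + 1)
      = (i + 1) + (cs.takeWhile (fun x => !pvIsSep x)).length := by omega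
  have e2 : cur + (((cs.takeWhile (fun x => !pvIsSep x)).length + 1 : Nat) : Int)
      = (cur + 1) + ((cs.takeWhile (fun x => !pvIsSep x)).length : Int) := by push_cast; ring
  have e3 : (i : Int) - cur = (((i + 1 : Nat)) : Int) - (cur + 1) := by push_cast; ring
  rw [e1, e2, e3]

theorem pvTwp_zero (l : List Char) (i : Nat) : pvTwp l i 0 = pvBTokens l i := by
  cases l with
  | nil => simp [pvTwp, pvBTokens]
  | cons c cs =>
    by_cases h : pvIsSep c
    · rw [pvTwp_cons_sep c cs i 0 h]
      rw [show pvBTokens (c :: cs) i = pvBTokens cs (i + 1) from by rw [pvBTokens]; simp [h]]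
      simp
    · simp only [pvTwp, List.takeWhile_cons, List.dropWhile_cons, h]
      rw [pvBTokens]
      simp [h]

theorem pvALoop_eq_fold (l : List Char) (i n : Nat) (idx mx cur : Int)
    (hn : i + l.length + 1 = n) (hmx : 0 ≤ mx) (hcur : 0 ≤ cur) :
    pvProj (pvALoop (l ++ [' ']) i n idx mx cur)
      = (pvTwp l i cur).foldl pvBStep (idx, mx) := by
  induction l generalizing i idx mx cur with
  | nil =>
    have hsep : pvIsSep ' ' = true := by decide
    simp only [List.nil_append, pvALoop, if_pos (Or.inl hsep), pvTwp_nil]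
    by_cases hc : cur > mx
    · rw [if_pos hc, if_pos (by omega : cur > 0)]
      simp [pvProj, List.foldl, pvBStep, hc]
    · rw [if_neg hc]
      split_ifs with h0
      · simp [pvProj, List.foldl, pvBStep, hc]
      · simp [pvProj, List.foldl]
  | cons c cs ih =>
    have hne : i ≠ n - 1 := by simp at hn; omega
    by_cases h : pvIsSep c
    · simp only [List.cons_append, pvALoop, if_pos (Or.inl h)]
      rw [pvTwp_cons_sep c cs i cur h, List.foldl_append]
      by_cases hc : cur > mx
      · rw [if_pos hc, if_pos (by omega : cur > 0)]
        rw [ih (i + 1) _ _ 0 (by simp at hn ⊢; omega) (by omega) le_rfl, pvTwp_zero]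
        simp [List.foldl, pvBStep, hc]
      · rw [if_neg hc]
        rw [ih (i + 1) idx mx 0 (by simp at hn ⊢; omega) hmx le_rfl, pvTwp_zero]
        split_ifs with h0
        · simp [List.foldl, pvBStep, hc]
        · simp [List.foldl]
    · have hcond : ¬(pvIsSep c = true ∨ i = n - 1) := by
        simp [h, hne]
      simp only [List.cons_append, pvALoop, if_neg hcond]
      rw [ih (i + 1) idx mx (cur + 1) (by simp at hn ⊢; omega) hmx (by omega)]
      rw [pvTwp_cons_nonsep c cs i cur (by simpa using h)]

-- ===== VERDICT (by name: the statement is the Claim_ definition above) =====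
theorem max_word_len_spec : Claim_equal_max_word_len := by
  intro sentence _
  show max_word_len sentence = max_word_len_alt sentence
  unfold max_word_len max_word_len_alt
  have := pvALoop_eq_fold sentence.toList 0 (sentence.toList ++ [' ']).length 0 0 0
    (by simp) le_rfl le_rfl
  rw [pvTwp_zero] at this
  simpa [pvProj, pvBStep] using this
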